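-- pv_equiv track=rewrite | github.com/LGeoff31/Advent-of-Code | day6.py | solve
-- ===== SOURCE A (Python) =====
-- def solve(lines):
--     grid = [list(line.rstrip('\n')) for line in lines]
--     h = len(grid)
--     w = max(len(row) for row in grid)
--
--     for row in grid:
--         row += [' '] * (w - len(row))
--
--     boundaries = []
--     for c in range(w):
--         if all(grid[r][c] == ' ' for r in range(h)):
--             boundaries.append(c)
--
--     chunks = []
--     prev = 0
--     for b in boundaries + [w]:
--         if b > prev:
--             chunks.append((prev, b))
--         prev = b + 1
--
--     total = 0
--
--     for (l, r) in reversed(chunks):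
--         bottom = ''.join(grid[-1][l:r]).strip()
--         op = bottom
--
--         numbers = []
--         for c in range(l, r):
--             col = [grid[r_i][c] for r_i in range(h-1)]
--             digits = [x for x in col if x.isdigit()]
--             if digits:
--                 numbers.append(int(''.join(digits)))
--
--         if not numbers:
--             continue
--
--         if op == '+':
--             val = sum(numbers)
--         else:
--             val = 1
--             for x in numbers:
--                 val *= x
--
--         total += val
--
--     return total
-- ===== SOURCE B (Python) =====
-- def solve(lines):
--     rows = [line.rstrip('\n') for line in lines]
--     h = len(rows)
--     w = max(len(r) for r in rows)
--     rows = [r.ljust(w) for r in rows]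
--
--     total = 0
--     nums = []
--     bottom = ''
--
--     def flush_value(ns, bot):
--         if not ns:
--             return 0
--         if bot.strip() == '+':
--             return sum(ns)
--         p = 1
--         for x in ns:
--             p *= x
--         return p
--
--     for c in range(w):
--         if all(row[c] == ' ' for row in rows):
--             total += flush_value(nums, bottom)
--             nums = []
--             bottom = ''
--         else:
--             ds = [row[c] for row in rows[:h-1] if row[c].isdigit()]
--             if ds:
--                 nums.append(int(''.join(ds)))
--             bottom += rows[h-1][c]
--
--     total += flush_value(nums, bottom)
--     return total
-- ===== Notes on version B (the rewrite author's own statement) =====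
-- stated objective: faster
-- what changed: Replaces A's three-phase pipeline (collect all separator columns, derive a chunk interval list, then re-scan each chunk in reverse with slicing) by a single left-to-right streaming pass over columns that maintains the current chunk's numbers and bottom string and flushes at each separator column and once at the end.
import Mathlib
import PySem

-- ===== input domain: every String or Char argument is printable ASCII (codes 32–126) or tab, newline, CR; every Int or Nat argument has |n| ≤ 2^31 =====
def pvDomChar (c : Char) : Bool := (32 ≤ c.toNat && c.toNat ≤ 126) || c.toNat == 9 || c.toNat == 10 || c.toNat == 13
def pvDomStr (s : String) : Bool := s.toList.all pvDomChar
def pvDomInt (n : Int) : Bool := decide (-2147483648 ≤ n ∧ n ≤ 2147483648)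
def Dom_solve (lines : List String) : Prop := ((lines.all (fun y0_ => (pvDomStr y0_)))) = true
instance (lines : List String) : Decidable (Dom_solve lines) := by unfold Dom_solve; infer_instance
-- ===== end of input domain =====

-- B replaces A's three-phase pipeline (separator columns → chunk intervals → reversed re-scan of
-- each chunk) by one streaming left-to-right pass over columns that flushes a running chunk state.

-- shared parsing helper: line.rstrip('\n')  (exact: drops exactly the trailing '\n' characters)
def rstripNL (cs : List Char) : List Char := (cs.reverse.dropWhile (fun c => c == '\n')).reverse

-- ===== PORT A =====
def solve (lines : List String) : Int :=
  let grid0 := lines.map (fun line => rstripNL line.toList)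
  let h := grid0.length
  -- max(len(row) for row in grid): raises ValueError on lines = [], excluded by Pre_solve
  let w := ((grid0.map (fun row => row.length)).max?).getD 0
  let grid := grid0.map (fun row => row ++ List.replicate (w - row.length) ' ')
  let boundaries := (List.range w).foldl (fun acc c =>
      if (List.range h).all (fun r => (grid.getD r []).getD c ' ' == ' ') then acc ++ [c] else acc) []
  let chunks := ((boundaries ++ [w]).foldl (fun st b =>
      (if st.2 < b then st.1 ++ [(st.2, b)] else st.1, b + 1)) (([] : List (Nat × Nat)), 0)).1
  chunks.reverse.foldl (fun total lr =>
    let bottom := PySem.Chars.strip (PySem.List.slice ((PySem.List.pyGet? grid (-1)).getD [])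
        (some (lr.1 : Int)) (some (lr.2 : Int)))
    let numbers := (List.range' lr.1 (lr.2 - lr.1)).foldl (fun ns c =>
        let col := (List.range (h - 1)).map (fun ri => (grid.getD ri []).getD c ' ')
        let digits := col.filter (fun x => PySem.Chars.isdigit x)
        if digits.isEmpty then ns else ns ++ [(PySem.Int.ofChars? digits).getD 0]) []
    if numbers.isEmpty then total
    else if bottom == ['+'] then total + numbers.sum
    else total + numbers.foldl (fun v x => v * x) 1) 0

-- ===== PORT B =====
def flushVal (nums : List Int) (bottom : List Char) : Int :=
  if nums.isEmpty then 0
  else if PySem.Chars.strip bottom == ['+'] then nums.sum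
  else nums.foldl (fun p x => p * x) 1

def solve_alt (lines : List String) : Int :=
  let rows0 := lines.map (fun line => rstripNL line.toList)
  let h := rows0.length
  -- max(len(r) for r in rows): raises ValueError on lines = [], excluded by Pre_solve
  let w := ((rows0.map (fun r => r.length)).max?).getD 0
  let rows := rows0.map (fun r => r ++ List.replicate (w - r.length) ' ')   -- r.ljust(w)
  let fin := (List.range w).foldl (fun st c =>
      if rows.all (fun row => row.getD c ' ' == ' ') then
        ([], [], st.2.2 + flushVal st.1 st.2.1)
      else
        let ds := ((rows.take (h - 1)).map (fun row => row.getD c ' ')).filter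
          (fun x => PySem.Chars.isdigit x)
        ((if ds.isEmpty then st.1 else st.1 ++ [(PySem.Int.ofChars? ds).getD 0]),
         st.2.1 ++ [(rows.getD (h - 1) []).getD c ' '], st.2.2))
    (([] : List Int), ([] : List Char), (0 : Int))
  fin.2.2 + flushVal fin.1 fin.2.1

-- ===== PRECONDITION & SPEC =====
-- Pre_ excludes only lines = [], where both Pythons raise ValueError (max() of an empty sequence).
def Pre_solve (lines : List String) : Prop := lines ≠ []
instance (lines : List String) : Decidable (Pre_solve lines) := by unfold Pre_solve; infer_instance
def pvWitness_solve : List String := ["1", "+"]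

def Spec_solve (lines : List String) (out : Int) : Prop := out = solve_alt lines
instance (lines : List String) (out : Int) : Decidable (Spec_solve lines out) := by unfold Spec_solve; infer_instance

-- ===== CLAIM (what is proved, stated in full; the proofs are below) =====
def Claim_equal_solve : Prop := ∀ (lines : List String), Dom_solve lines → Pre_solve lines → Spec_solve lines (solve lines)

-- ===== LEMMAS AND PROOFS =====

-- first separator column at or after l (w if none)
def nextSep (sep : Nat → Bool) (w l : Nat) : Nat :=
  if l < w then (if sep l then l else nextSep sep w (l + 1)) else w
termination_by w - l

lemma le_nextSep (sep : Nat → Bool) (w l : Nat) (hl : l ≤ w) : l ≤ nextSep sep w l := by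
  unfold nextSep
  split_ifs with h1 h2
  · exact le_refl l
  · exact le_trans (by omega) (le_nextSep sep w (l + 1) (by omega))
  · omega
termination_by w - l

lemma nextSep_le (sep : Nat → Bool) (w l : Nat) (hl : l ≤ w) : nextSep sep w l ≤ w := by
  unfold nextSep
  split_ifs with h1 h2
  · omega
  · exact nextSep_le sep w (l + 1) (by omega)
  · omega
termination_by w - l

lemma nextSep_sep (sep : Nat → Bool) (w l : Nat) (h : nextSep sep w l < w) :
    sep (nextSep sep w l) = true := by
  unfold nextSep at *
  split_ifs at * with h1 h2
  · exact h2
  · exact nextSep_sep sep w (l + 1) h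
  · omega
termination_by w - l

-- the numbers / bottom characters accumulated over columns [l, s)
def flatNum (num : Nat → List Int) (l s : Nat) : List Int := (List.range' l (s - l)).flatMap num
def bcsOf (bc : Nat → Char) (l s : Nat) : List Char := (List.range' l (s - l)).map bc

-- total of all chunks contained in columns [l, w)
def chunkTotal (sep : Nat → Bool) (num : Nat → List Int) (bc : Nat → Char) (w l : Nat) : Int :=
  if _hlw : l < w then
    (if sep l then chunkTotal sep num bc w (l + 1)
     else flushVal (flatNum num l (nextSep sep w l)) (bcsOf bc l (nextSep sep w l)) +
          chunkTotal sep num bc w (nextSep sep w l + 1))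
  else 0
termination_by w - l
decreasing_by
  · omega
  · have := le_nextSep sep w l (by omega); omega

lemma flushVal_nil (bs : List Char) : flushVal [] bs = 0 := by simp [flushVal]

lemma flatNum_self (num : Nat → List Int) (l : Nat) : flatNum num l l = [] := by
  simp [flatNum]

lemma bcsOf_self (bc : Nat → Char) (l : Nat) : bcsOf bc l l = [] := by
  simp [bcsOf]

lemma flatNum_cons (num : Nat → List Int) (l s : Nat) (h : l < s) :
    flatNum num l s = num l ++ flatNum num (l + 1) s := by
  unfold flatNum
  rw [show s - l = (s - (l + 1)) + 1 by omega, List.range'_succ]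
  simp

lemma bcsOf_cons (bc : Nat → Char) (l s : Nat) (h : l < s) :
    bcsOf bc l s = bc l :: bcsOf bc (l + 1) s := by
  unfold bcsOf
  rw [show s - l = (s - (l + 1)) + 1 by omega, List.range'_succ]
  simp

lemma chunkTotal_stop (sep : Nat → Bool) (num : Nat → List Int) (bc : Nat → Char) (w l : Nat)
    (h : w ≤ l) : chunkTotal sep num bc w l = 0 := by
  conv_lhs => rw [chunkTotal.eq_def]
  simp [Nat.not_lt.mpr h]

lemma nextSep_stop (sep : Nat → Bool) (w l : Nat) (h : w ≤ l) : nextSep sep w l = w := by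
  conv_lhs => rw [nextSep.eq_def]
  simp [Nat.not_lt.mpr h]

lemma nextSep_of_sep (sep : Nat → Bool) (w l : Nat) (h : l < w) (hs : sep l = true) :
    nextSep sep w l = l := by
  conv_lhs => rw [nextSep.eq_def]
  simp [h, hs]

lemma nextSep_of_not_sep (sep : Nat → Bool) (w l : Nat) (h : l < w) (hs : sep l = false) :
    nextSep sep w l = nextSep sep w (l + 1) := by
  conv_lhs => rw [nextSep.eq_def]
  simp [h, hs]

lemma chunkTotal_of_sep (sep : Nat → Bool) (num : Nat → List Int) (bc : Nat → Char) (w l : Nat)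
    (h : l < w) (hs : sep l = true) :
    chunkTotal sep num bc w l = chunkTotal sep num bc w (l + 1) := by
  conv_lhs => rw [chunkTotal.eq_def]
  simp [h, hs]

lemma chunkTotal_of_not_sep (sep : Nat → Bool) (num : Nat → List Int) (bc : Nat → Char)
    (w l : Nat) (h : l < w) (hs : sep l = false) :
    chunkTotal sep num bc w l =
      flushVal (flatNum num l (nextSep sep w l)) (bcsOf bc l (nextSep sep w l)) +
      chunkTotal sep num bc w (nextSep sep w l + 1) := by
  conv_lhs => rw [chunkTotal.eq_def]
  simp [h, hs]

lemma chunkTotal_unfold (sep : Nat → Bool) (num : Nat → List Int) (bc : Nat → Char) (w l : Nat)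
    (hl : l ≤ w) :
    chunkTotal sep num bc w l =
      flushVal (flatNum num l (nextSep sep w l)) (bcsOf bc l (nextSep sep w l)) +
      chunkTotal sep num bc w (nextSep sep w l + 1) := by
  rcases Nat.lt_or_ge l w with h | h
  · rcases Bool.eq_false_or_eq_true (sep l) with hs | hs
    · rw [nextSep_of_sep sep w l h hs, flatNum_self, bcsOf_self, flushVal_nil,
        chunkTotal_of_sep sep num bc w l h hs]
      ring
    · exact chunkTotal_of_not_sep sep num bc w l h hs
  · have hlw : l = w := by omega
    subst hlw
    rw [nextSep_stop sep l l (le_refl l), flatNum_self, bcsOf_self, flushVal_nil,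
      chunkTotal_stop sep num bc l l (le_refl l), chunkTotal_stop sep num bc l (l + 1) (by omega)]
    ring

-- A's chunk-list construction, recursively
def mkChunksGo (prev : Nat) : List Nat → List (Nat × Nat)
  | [] => []
  | b :: rest => (if prev < b then [(prev, b)] else []) ++ mkChunksGo (b + 1) rest

lemma foldl_mkChunks (bs : List Nat) (acc : List (Nat × Nat)) (prev : Nat) :
    ((bs.foldl (fun st b => (if st.2 < b then st.1 ++ [(st.2, b)] else st.1, b + 1)) (acc, prev)).1)
      = acc ++ mkChunksGo prev bs := by
  induction bs generalizing acc prev with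
  | nil => simp [mkChunksGo]
  | cons b rest ih =>
      simp only [List.foldl_cons, mkChunksGo]
      split_ifs with h <;> simp [ih]

lemma nextSep_filter (sep : Nat → Bool) (w l : Nat) (hl : l ≤ w) :
    (List.range' l (w - l)).filter sep
      = (List.range' (nextSep sep w l) (w - nextSep sep w l)).filter sep := by
  rcases Nat.lt_or_ge l w with h | h
  · rcases Bool.eq_false_or_eq_true (sep l) with hs | hs
    · rw [nextSep_of_sep sep w l h hs]
    · rw [nextSep_of_not_sep sep w l h hs,
        show w - l = (w - (l + 1)) + 1 by omega, List.range'_succ, List.filter_cons_of_neg (by simp [hs])]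
      exact nextSep_filter sep w (l + 1) (by omega)
  · rw [nextSep_stop sep w l h, show w - l = 0 by omega, Nat.sub_self]
    simp
termination_by w - l

-- A-side: the chunk sum equals chunkTotal
lemma a_side (sep : Nat → Bool) (num : Nat → List Int) (bc : Nat → Char) (w prev : Nat)
    (hp : prev ≤ w) :
    ((mkChunksGo prev ((List.range' prev (w - prev)).filter sep ++ [w])).map
        (fun lr => flushVal (flatNum num lr.1 lr.2) (bcsOf bc lr.1 lr.2))).sum
      = chunkTotal sep num bc w prev := by
  rcases Nat.lt_or_ge prev w with h | h
  · rcases Bool.eq_false_or_eq_true (sep prev) with hs | hs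
    · -- sep prev = true : no chunk starts here
      rw [show w - prev = (w - (prev + 1)) + 1 by omega, List.range'_succ,
        List.filter_cons_of_pos (by simp [hs]), chunkTotal_of_sep sep num bc w prev h hs]
      have := a_side sep num bc w (prev + 1) (by omega)
      simpa [mkChunksGo] using this
    · -- sep prev = false : a chunk [prev, nextSep) is emitted
      have hf := nextSep_filter sep w prev hp
      have hps : prev + 1 ≤ nextSep sep w prev := by
        rw [nextSep_of_not_sep sep w prev h hs]
        exact le_nextSep sep w (prev + 1) (by omega)
      have hsw : nextSep sep w prev ≤ w := nextSep_le sep w prev hp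
      rw [hf, chunkTotal_of_not_sep sep num bc w prev h hs]
      rcases Nat.lt_or_ge (nextSep sep w prev) w with hsw' | hsw'
      · have hss : sep (nextSep sep w prev) = true := nextSep_sep sep w prev hsw'
        rw [show w - nextSep sep w prev = (w - (nextSep sep w prev + 1)) + 1 by omega,
          List.range'_succ, List.filter_cons_of_pos (by simp [hss])]
        simp only [List.cons_append, mkChunksGo,
          if_pos (show prev < nextSep sep w prev by omega),
          List.nil_append, List.map_cons, List.sum_cons]
        rw [a_side sep num bc w (nextSep sep w prev + 1) (by omega)]
      · have hsww : nextSep sep w prev = w := by omega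
        rw [hsww, Nat.sub_self, chunkTotal_stop sep num bc w (w + 1) (by omega)]
        simp [mkChunksGo, if_pos h]
  · have hpw : prev = w := by omega
    subst hpw
    rw [Nat.sub_self, chunkTotal_stop sep num bc prev prev (le_refl prev)]
    simp [mkChunksGo]
termination_by w - prev

-- B-side: the streaming fold with its pending chunk state
def streamFin (sep : Nat → Bool) (num : Nat → List Int) (bc : Nat → Char) (cols : List Nat)
    (st : List Int × List Char × Int) : Int :=
  let fin := cols.foldl (fun st c =>
      if sep c then (([] : List Int), ([] : List Char), st.2.2 + flushVal st.1 st.2.1)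
      else (st.1 ++ num c, st.2.1 ++ [bc c], st.2.2)) st
  fin.2.2 + flushVal fin.1 fin.2.1

lemma streamFin_cons (sep : Nat → Bool) (num : Nat → List Int) (bc : Nat → Char) (c : Nat)
    (cols : List Nat) (st : List Int × List Char × Int) :
    streamFin sep num bc (c :: cols) st
      = streamFin sep num bc cols
          (if sep c then (([] : List Int), ([] : List Char), st.2.2 + flushVal st.1 st.2.1)
           else (st.1 ++ num c, st.2.1 ++ [bc c], st.2.2)) := by
  simp [streamFin]

lemma b_side (sep : Nat → Bool) (num : Nat → List Int) (bc : Nat → Char) (w l : Nat)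
    (hl : l ≤ w) (ns : List Int) (bs : List Char) (t : Int) :
    streamFin sep num bc (List.range' l (w - l)) (ns, bs, t)
      = t + flushVal (ns ++ flatNum num l (nextSep sep w l)) (bs ++ bcsOf bc l (nextSep sep w l)) +
        chunkTotal sep num bc w (nextSep sep w l + 1) := by
  rcases Nat.lt_or_ge l w with h | h
  · rw [show w - l = (w - (l + 1)) + 1 by omega, List.range'_succ, streamFin_cons]
    rcases Bool.eq_false_or_eq_true (sep l) with hs | hs
    · -- separator column: flush
      rw [if_pos (by simp [hs]), b_side sep num bc w (l + 1) (by omega),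
        nextSep_of_sep sep w l h hs, flatNum_self, bcsOf_self,
        chunkTotal_unfold sep num bc w (l + 1) (by omega)]
      simp only [List.nil_append, List.append_nil]
      ring
    · -- content column: accumulate
      rw [if_neg (by simp [hs]), b_side sep num bc w (l + 1) (by omega),
        nextSep_of_not_sep sep w l h hs]
      have hps : l < nextSep sep w (l + 1) := le_nextSep sep w (l + 1) (by omega)
      rw [flatNum_cons num l (nextSep sep w (l + 1)) hps,
        bcsOf_cons bc l (nextSep sep w (l + 1)) hps]
      simp
  · have hlw : l = w := by omega
    subst hlw
    rw [Nat.sub_self, nextSep_stop sep l l (le_refl l), flatNum_self, bcsOf_self,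
      chunkTotal_stop sep num bc l (l + 1) (by omega)]
    simp [streamFin]
termination_by w - l

-- generic bridging lemmas between indexed and structural traversals
lemma all_range_getD {α : Type} (G : List α) (p : α → Bool) (d : α) :
    ((List.range G.length).all fun r => p (G.getD r d)) = G.all p := by
  rw [Bool.eq_iff_iff]
  simp only [List.all_eq_true, List.mem_range]
  constructor
  · intro H x hx
    obtain ⟨i, hi, rfl⟩ := List.mem_iff_getElem.mp hx
    have := H i hi
    rwa [List.getD_eq_getElem G d hi] at this
  · intro H i hi
    rw [List.getD_eq_getElem G d hi]
    exact H _ (List.getElem_mem hi)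

lemma range_map_getD_take {α : Type} (G : List α) (n : Nat) (d : α) (hn : n ≤ G.length) :
    (List.range n).map (fun i => G.getD i d) = G.take n := by
  apply List.ext_getElem
  · simp [hn]
  · intro i h1 h2
    simp at h1 h2 ⊢
    rw [List.getElem?_eq_getElem (by omega)]
    rfl

lemma dropTake_eq_map_range' {α : Type} (xs : List α) (l n : Nat) (d : α)
    (hn : l + n ≤ xs.length) :
    (xs.drop l).take n = (List.range' l n).map (fun i => xs.getD i d) := by
  apply List.ext_getElem
  · simp; omega
  · intro i h1 h2
    simp at h1 h2 ⊢
    rw [List.getElem?_eq_getElem (by omega)]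
    rfl

lemma mkChunksGo_bounds (w : Nat) (bs : List Nat) (hb : ∀ b ∈ bs, b ≤ w) :
    ∀ prev, ∀ lr ∈ mkChunksGo prev bs, lr.1 < lr.2 ∧ lr.2 ≤ w := by
  induction bs with
  | nil => intro prev lr hlr; simp [mkChunksGo] at hlr
  | cons b rest ih =>
      intro prev lr hlr
      simp only [mkChunksGo, List.mem_append] at hlr
      rcases hlr with hlr | hlr
      · rcases Nat.lt_or_ge prev b with hpb | hpb
        · rw [if_pos hpb] at hlr
          simp at hlr
          subst hlr
          exact ⟨hpb, hb b (by simp)⟩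
        · rw [if_neg (by omega)] at hlr
          simp at hlr
      · exact ih (fun x hx => hb x (by simp [hx])) (b + 1) lr hlr

lemma flushVal_ite (t : Int) (nums : List Int) (bot : List Char) :
    (if nums.isEmpty then t
     else if PySem.Chars.strip bot == ['+'] then t + nums.sum
     else t + nums.foldl (fun v x => v * x) 1) = t + flushVal nums bot := by
  by_cases h1 : nums.isEmpty <;> simp [flushVal, h1]
  split_ifs <;> ring

-- ===== VERDICT (by name: the statement is the Claim_ definition above) =====
theorem solve_spec : Claim_equal_solve := by
  unfold Claim_equal_solve Pre_solve Spec_solve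
  intro lines _hdom hpre
  simp only [solve, solve_alt]
  -- name the shared parse results
  have hG0ne : lines.map (fun line => rstripNL line.toList) ≠ [] := by
    simpa using hpre
  generalize hG0 : lines.map (fun line => rstripNL line.toList) = G0 at *
  have hle : ∀ r ∈ G0, r.length ≤ ((G0.map (fun row => row.length)).max?).getD 0 := by
    intro r hr
    exact List.le_max?_getD_of_mem (List.mem_map_of_mem hr)
  generalize hw : ((G0.map (fun row => row.length)).max?).getD 0 = w at *
  have hGlen : (G0.map (fun row => row ++ List.replicate (w - row.length) ' ')).length
      = G0.length := by simp
  have hGne : G0.map (fun row => row ++ List.replicate (w - row.length) ' ') ≠ [] := by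
    simpa using hG0ne
  have hGrow : ∀ row ∈ G0.map (fun row => row ++ List.replicate (w - row.length) ' '),
      row.length = w := by
    intro row hrow
    obtain ⟨r0, hr0, rfl⟩ := List.mem_map.mp hrow
    have := hle r0 hr0
    simp
    omega
  generalize hG : G0.map (fun row => row ++ List.replicate (w - row.length) ' ') = G at *
  rw [← hGlen]
  have hGpos : 0 < G.length := List.length_pos_of_ne_nil hGne
  -- the per-column abstractions shared by both sides
  trans chunkTotal (fun c => G.all fun row => row.getD c ' ' == ' ')
      (fun c => if (List.filter (fun x => PySem.Chars.isdigit x)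
            (List.map (fun row => row.getD c ' ') (List.take (G.length - 1) G))).isEmpty then
          ([] : List Int)
        else [(PySem.Int.ofChars? (List.filter (fun x => PySem.Chars.isdigit x)
            (List.map (fun row => row.getD c ' ') (List.take (G.length - 1) G)))).getD 0])
      (fun c => (G.getD (G.length - 1) []).getD c ' ') w 0
  · -- A-side: boundaries/chunks pipeline = chunkTotal
    have hsepc : ∀ c : Nat, ((List.range G.length).all fun r => (G.getD r []).getD c ' ' == ' ')
        = (G.all fun row => row.getD c ' ' == ' ') :=
      fun c => all_range_getD G (fun row => row.getD c ' ' == ' ') []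
    simp only [hsepc]
    have hcol : ∀ c : Nat, (List.range (G.length - 1)).map (fun ri => (G.getD ri []).getD c ' ')
        = (G.take (G.length - 1)).map (fun row => row.getD c ' ') := by
      intro c
      rw [← range_map_getD_take G (G.length - 1) [] (by omega), List.map_map]
      rfl
    simp only [hcol]
    have hlast : (PySem.List.pyGet? G (-1)).getD [] = G.getD (G.length - 1) [] := by
      rw [PySem.List.pyGet?_neg_one, List.getLast?_eq_getElem?]
      rfl
    simp only [hlast]
    rw [List.range_eq_range']
    simp only [PySem.List.foldl_append_if, List.map_id', List.nil_append]
    rw [foldl_mkChunks, List.nil_append]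
    have hnum : ∀ (ns : List Int) (c : Nat),
        (if (List.filter (fun x => PySem.Chars.isdigit x)
              (List.map (fun row => row.getD c ' ') (List.take (G.length - 1) G))).isEmpty = true then
            ns
          else ns ++ [(PySem.Int.ofChars? (List.filter (fun x => PySem.Chars.isdigit x)
              (List.map (fun row => row.getD c ' ') (List.take (G.length - 1) G)))).getD 0])
        = ns ++ (if (List.filter (fun x => PySem.Chars.isdigit x)
              (List.map (fun row => row.getD c ' ') (List.take (G.length - 1) G))).isEmpty = true then
            ([] : List Int)
          else [(PySem.Int.ofChars? (List.filter (fun x => PySem.Chars.isdigit x)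
              (List.map (fun row => row.getD c ' ') (List.take (G.length - 1) G)))).getD 0]) := by
      intro ns c
      split_ifs <;> simp
    simp only [hnum, PySem.List.foldl_append_eq_flatMap, List.nil_append]
    have hbmem : ∀ b ∈ (List.range' 0 w).filter (fun c => G.all fun row => row.getD c ' ' == ' ')
        ++ [w], b ≤ w := by
      intro b hb
      rcases List.mem_append.mp hb with hb | hb
      · have := (List.mem_filter.mp hb).1
        have := List.mem_range'_1.mp this
        omega
      · simp at hb
        omega
    rw [PySem.List.foldl_congr_mem _ _
      (fun (total : Int) (lr : Nat × Nat) => total +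
        flushVal (flatNum (fun c => if (List.filter (fun x => PySem.Chars.isdigit x)
              (List.map (fun row => row.getD c ' ') (List.take (G.length - 1) G))).isEmpty then
            ([] : List Int)
          else [(PySem.Int.ofChars? (List.filter (fun x => PySem.Chars.isdigit x)
              (List.map (fun row => row.getD c ' ') (List.take (G.length - 1) G)))).getD 0])
          lr.1 lr.2)
        (bcsOf (fun c => (G.getD (G.length - 1) []).getD c ' ') lr.1 lr.2)) 0 (by
      intro acc lr hlr
      obtain ⟨h1, h2⟩ := mkChunksGo_bounds w _ hbmem 0 lr (List.mem_reverse.mp hlr)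
      have hLlen : (G.getD (G.length - 1) []).length = w := by
        rw [List.getD_eq_getElem G [] (by omega)]
        exact hGrow _ (List.getElem_mem _)
      rw [PySem.List.slice_natCast,
        dropTake_eq_map_range' _ lr.1 (lr.2 - lr.1) ' ' (by rw [hLlen]; omega),
        flushVal_ite]
      rfl)]
    rw [PySem.List.foldl_add, zero_add, List.map_reverse, List.sum_reverse]
    have ha := a_side (fun c => G.all fun row => row.getD c ' ' == ' ')
      (fun c => if (List.filter (fun x => PySem.Chars.isdigit x)
            (List.map (fun row => row.getD c ' ') (List.take (G.length - 1) G))).isEmpty then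
          ([] : List Int)
        else [(PySem.Int.ofChars? (List.filter (fun x => PySem.Chars.isdigit x)
            (List.map (fun row => row.getD c ' ') (List.take (G.length - 1) G)))).getD 0])
      (fun c => (G.getD (G.length - 1) []).getD c ' ') w 0 (Nat.zero_le w)
    simp only [Nat.sub_zero] at ha
    exact ha
  · -- B-side: streaming pass = chunkTotal
    symm
    have hfun : (fun (st : List Int × List Char × Int) (c : Nat) =>
        if (G.all fun row => row.getD c ' ' == ' ') = true then
          (([] : List Int), ([] : List Char), st.2.2 + flushVal st.1 st.2.1)
        else
          ((if (List.filter (fun x => PySem.Chars.isdigit x)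
                (List.map (fun row => row.getD c ' ') (List.take (G.length - 1) G))).isEmpty then
              st.1
            else st.1 ++ [(PySem.Int.ofChars? (List.filter (fun x => PySem.Chars.isdigit x)
                (List.map (fun row => row.getD c ' ') (List.take (G.length - 1) G)))).getD 0]),
           st.2.1 ++ [(G.getD (G.length - 1) []).getD c ' '], st.2.2))
      = (fun (st : List Int × List Char × Int) (c : Nat) =>
        if (G.all fun row => row.getD c ' ' == ' ') = true then
          (([] : List Int), ([] : List Char), st.2.2 + flushVal st.1 st.2.1)
        else
          (st.1 ++ (if (List.filter (fun x => PySem.Chars.isdigit x)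
                (List.map (fun row => row.getD c ' ') (List.take (G.length - 1) G))).isEmpty then
              ([] : List Int)
            else [(PySem.Int.ofChars? (List.filter (fun x => PySem.Chars.isdigit x)
                (List.map (fun row => row.getD c ' ') (List.take (G.length - 1) G)))).getD 0]),
           st.2.1 ++ [(G.getD (G.length - 1) []).getD c ' '], st.2.2)) := by
      funext st c
      by_cases hsep : (G.all fun row => row.getD c ' ' == ' ') = true
      · rw [if_pos hsep, if_pos hsep]
      · rw [if_neg hsep, if_neg hsep]
        by_cases hds : (List.filter (fun x => PySem.Chars.isdigit x)
            (List.map (fun row => row.getD c ' ') (List.take (G.length - 1) G))).isEmpty = true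
        · rw [if_pos hds, if_pos hds, List.append_nil]
        · rw [if_neg hds, if_neg hds]
    rw [hfun]
    show streamFin (fun c => G.all fun row => row.getD c ' ' == ' ')
        (fun c => if (List.filter (fun x => PySem.Chars.isdigit x)
              (List.map (fun row => row.getD c ' ') (List.take (G.length - 1) G))).isEmpty then
            ([] : List Int)
          else [(PySem.Int.ofChars? (List.filter (fun x => PySem.Chars.isdigit x)
              (List.map (fun row => row.getD c ' ') (List.take (G.length - 1) G)))).getD 0])
        (fun c => (G.getD (G.length - 1) []).getD c ' ') (List.range w) ([], [], 0)
      = _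
    rw [List.range_eq_range']
    have hb := b_side (fun c => G.all fun row => row.getD c ' ' == ' ')
        (fun c => if (List.filter (fun x => PySem.Chars.isdigit x)
              (List.map (fun row => row.getD c ' ') (List.take (G.length - 1) G))).isEmpty then
            ([] : List Int)
          else [(PySem.Int.ofChars? (List.filter (fun x => PySem.Chars.isdigit x)
              (List.map (fun row => row.getD c ' ') (List.take (G.length - 1) G)))).getD 0])
        (fun c => (G.getD (G.length - 1) []).getD c ' ') w 0 (Nat.zero_le w) [] [] 0
    simp only [Nat.sub_zero, List.nil_append] at hb
    rw [hb, zero_add, ← chunkTotal_unfold _ _ _ w 0 (Nat.zero_le w)]
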